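-- pv_equiv track=rewrite | github.com/worksbyfriday/crossing | semantic_scan.py | _build_ancestor_map
-- ===== SOURCE A (Python) =====
-- def _build_ancestor_map(exception_parents: dict[str, str]) -> dict[str, set[str]]:
--     """Build a map from each exception type to all its ancestors.
--
--     If CustomError -> ValueError -> Exception, then
--     ancestors["CustomError"] = {"ValueError", "Exception"}.
--     """
--     ancestors: dict[str, set[str]] = {}
--     for child in exception_parents:
--         chain: set[str] = set()
--         current = child
--         while current in exception_parents:
--             parent = exception_parents[current]
--             if parent in chain:
--                 break  # cycle guard
--             chain.add(parent)
--             current = parent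
--         ancestors[child] = chain
--     return ancestors
-- ===== SOURCE B (Python) =====
-- def _build_ancestor_map(exception_parents: dict[str, str]) -> dict[str, set[str]]:
--     """Memoized rewrite: each node's ancestor set is built once.  Walk only the
--     not-yet-resolved part of the parent path, resolve a discovered cycle by rotation,
--     then unwind the path back-to-front with chain(node) = {parent} | chain(parent)."""
--     memo: dict[str, set[str]] = {}
--     for child in exception_parents:
--         if child in memo:
--             continue
--         path: list[str] = []
--         onpath: set[str] = set()
--         cur = child
--         while cur in exception_parents and cur not in memo and cur not in onpath:
--             path.append(cur)
--             onpath.add(cur)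
--             cur = exception_parents[cur]
--         if cur in onpath:
--             # the walk closed a cycle at cur: every cycle node's ancestor set is the
--             # whole cycle (including itself)
--             j = path.index(cur)
--             cyc = path[j:]
--             path = path[:j]
--             for i in range(len(cyc)):
--                 memo[cyc[i]] = set(cyc[i + 1:] + cyc[:i + 1])
--         for node in reversed(path):
--             p = exception_parents[node]
--             memo[node] = {p} | memo.get(p, set())
--     return {c: memo[c] for c in exception_parents}
-- ===== Notes on version B (the rewrite author's own statement) =====
-- stated objective: alternative
-- what changed: A re-walks the full parent chain from scratch for every key; B memoizes: it walks only the not-yet-resolved part of each parent path, resolves a discovered cycle by assigning all cycle members their rotated chain at once, and unwinds the path back-to-front with chain(node) = {parent} | chain(parent), so every edge of the parent graph is traversed once.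
import Mathlib
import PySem

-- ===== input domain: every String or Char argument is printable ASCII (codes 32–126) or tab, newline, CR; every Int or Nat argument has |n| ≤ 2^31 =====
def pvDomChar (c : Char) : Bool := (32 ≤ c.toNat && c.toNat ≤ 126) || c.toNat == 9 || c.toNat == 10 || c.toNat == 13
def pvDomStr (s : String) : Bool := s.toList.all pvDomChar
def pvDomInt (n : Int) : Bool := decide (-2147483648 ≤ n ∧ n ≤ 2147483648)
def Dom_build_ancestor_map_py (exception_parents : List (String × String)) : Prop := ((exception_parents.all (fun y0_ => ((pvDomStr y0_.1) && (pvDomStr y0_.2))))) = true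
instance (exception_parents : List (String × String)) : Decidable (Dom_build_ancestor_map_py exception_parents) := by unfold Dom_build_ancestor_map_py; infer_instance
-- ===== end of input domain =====

-- B re-implements A's per-child ancestor walk with memoization: it walks only the
-- not-yet-resolved part of each parent path, resolves a discovered cycle by rotation,
-- and unwinds each path back-to-front with chain(node) = {parent} ∪ chain(parent).


-- ===== PORT A =====
-- the dict parameter is PySem.Dict.ofList of the pair list (Python dict(...): first
-- occurrence keeps its position, later duplicates overwrite the value in place).
-- pvWalkA is the 'while current in exception_parents' loop; fuel d.size + 1 is exact:
-- every iteration adds a fresh element of d.values to `chain`, so after at most d.size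
-- steps the loop stops by itself (proved below: pv_walkA_exact / pv_walkA_exists).
def pvWalkA (d : PySem.Dict String String) : Nat → PySem.Set String → String → PySem.Set String
  | 0, chain, _ => chain
  | fuel+1, chain, cur =>
    match d.get? cur with
    | none => chain
    | some parent =>
      if PySem.Set.contains chain parent then chain
      else pvWalkA d fuel (PySem.Set.add chain parent) parent

def build_ancestor_map_py (exception_parents : List (String × String)) : List (String × List String) :=
  let d := PySem.Dict.ofList exception_parents
  (d.keys.foldl (fun (anc : PySem.Dict String (PySem.Set String)) child =>
      anc.insert child (pvWalkA d (d.size + 1) PySem.Set.empty child)) PySem.Dict.empty).items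

-- ===== PORT B =====
-- pvWalkB is the 'while cur in exception_parents and cur not in memo and cur not in
-- onpath' loop; fuel d.size + 1 is exact: every iteration appends a fresh key of d to
-- `path` (proved below: pv_walkB_spec).  d.getD cur "" is exception_parents[cur],
-- exact under the guard d.contains cur.
def pvWalkB (d : PySem.Dict String String) (memo : PySem.Dict String (PySem.Set String)) :
    Nat → List String → PySem.Set String → String → List String × PySem.Set String × String
  | 0, path, onpath, cur => (path, onpath, cur)
  | fuel+1, path, onpath, cur =>
    if d.contains cur && !(memo.contains cur) && !(PySem.Set.contains onpath cur) then
      pvWalkB d memo fuel (path ++ [cur]) (PySem.Set.add onpath cur) (d.getD cur "")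
    else (path, onpath, cur)

def pvProcess (d : PySem.Dict String String) (memo : PySem.Dict String (PySem.Set String))
    (child : String) : PySem.Dict String (PySem.Set String) :=
  if memo.contains child then memo
  else
    let r := pvWalkB d memo (d.size + 1) [] PySem.Set.empty child
    let path := r.1
    let onpath := r.2.1
    let cur := r.2.2
    let mp :=
      if PySem.Set.contains onpath cur then
        let j : Nat := (PySem.List.index? path cur).getD 0
        let cyc := PySem.List.slice path (some (j : Int)) none
        let path' := PySem.List.slice path none (some (j : Int))
        ((PySem.List.pyRange 0 cyc.length 1).foldl (fun m i =>
            m.insert (PySem.List.pyGetD cyc i "")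
              (PySem.Set.ofList (PySem.List.slice cyc (some (i + 1)) none ++
                                 PySem.List.slice cyc none (some (i + 1))))) memo, path')
      else (memo, path)
    mp.2.reverse.foldl (fun m node =>
      m.insert node (PySem.Set.union (PySem.Set.ofList [d.getD node ""])
        (m.getD (d.getD node "") PySem.Set.empty))) mp.1

def build_ancestor_map_py_alt (exception_parents : List (String × String)) : List (String × List String) :=
  let d := PySem.Dict.ofList exception_parents
  let memo := d.keys.foldl (pvProcess d) PySem.Dict.empty
  (d.keys.foldl (fun (out : PySem.Dict String (PySem.Set String)) c =>
      out.insert c (memo.getD c PySem.Set.empty)) PySem.Dict.empty).items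

-- ===== PRECONDITION & SPEC =====
def Spec_build_ancestor_map_py (exception_parents : List (String × String)) (out : List (String × List String)) : Prop := out = build_ancestor_map_py_alt exception_parents
instance (exception_parents : List (String × String)) (out : List (String × List String)) : Decidable (Spec_build_ancestor_map_py exception_parents out) := by unfold Spec_build_ancestor_map_py; infer_instance

-- ===== CLAIM (what is proved, stated in full; the proofs are below) =====
def Claim_equal_build_ancestor_map_py : Prop := ∀ (exception_parents : List (String × String)), Dom_build_ancestor_map_py exception_parents → Spec_build_ancestor_map_py exception_parents (build_ancestor_map_py exception_parents)

-- ===== LEMMAS AND PROOFS =====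

def pvIsPath (d : PySem.Dict String String) : String → List String → Prop
  | _, [] => True
  | c, x :: xs => d.get? c = some x ∧ pvIsPath d x xs

theorem pv_contains_iff (s : List String) (x : String) : PySem.Set.contains s x = true ↔ x ∈ s := by
  simp [PySem.Set.contains]

theorem pv_get_mem_values (d : PySem.Dict String String) (c p : String)
    (h : d.get? c = some p) : p ∈ d.values := by
  simp only [PySem.Dict.get?, Option.map_eq_some_iff] at h
  obtain ⟨pr, hfind, hp⟩ := h
  have := List.mem_of_find?_eq_some hfind
  simp only [PySem.Dict.values, List.mem_map]
  exact ⟨pr, this, hp⟩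

theorem pv_isPath_append (d : PySem.Dict String String) (L1 L2 : List String) :
    ∀ c, pvIsPath d c (L1 ++ L2) ↔ pvIsPath d c L1 ∧ pvIsPath d (L1.getLastD c) L2 := by
  induction L1 with
  | nil => intro c; simp [pvIsPath]
  | cons x xs ih =>
    intro c
    simp only [List.cons_append, pvIsPath, List.getLastD_cons, ih x]
    tauto

theorem pv_len_le (d : PySem.Dict String String) (L : List String)
    (hnd : L.Nodup) (hsub : ∀ x ∈ L, x ∈ d.values) : L.length ≤ d.size := by
  have h1 : List.Subperm L d.values := hnd.subperm (fun x hx => hsub x hx)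
  have := h1.length_le
  simpa [PySem.Dict.values, PySem.Dict.size] using this


theorem pv_set_add_eq (s : List String) (x : String) (h : x ∉ s) :
    PySem.Set.add s x = s ++ [x] := by
  simp [PySem.Set.add, PySem.Set.contains]
  intro hc
  exact absurd hc h

theorem pv_walkA_step (d : PySem.Dict String String) (m : Nat) (seen : List String)
    (c x : String) (hgx : d.get? c = some x) (hx : x ∉ seen) :
    pvWalkA d (m+1) seen c = pvWalkA d m (seen ++ [x]) x := by
  have hcont : PySem.Set.contains seen x = false := by
    rw [← Bool.not_eq_true, pv_contains_iff]; exact hx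
  rw [show pvWalkA d (m+1) seen c =
      (match d.get? c with
       | none => seen
       | some parent =>
         if PySem.Set.contains seen parent then seen
         else pvWalkA d m (PySem.Set.add seen parent) parent) from rfl,
    hgx]
  simp only [hcont, Bool.false_eq_true, if_false]
  rw [pv_set_add_eq seen x hx]

theorem pv_walkA_stop (d : PySem.Dict String String) (m : Nat) (seen : List String)
    (c : String) (h : ∀ p, d.get? c = some p → p ∈ seen) :
    pvWalkA d (m+1) seen c = seen := by
  rw [show pvWalkA d (m+1) seen c =
      (match d.get? c with
       | none => seen
       | some parent =>
         if PySem.Set.contains seen parent then seen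
         else pvWalkA d m (PySem.Set.add seen parent) parent) from rfl]
  cases hg : d.get? c with
  | none => rfl
  | some p =>
    have : PySem.Set.contains seen p = true := (pv_contains_iff seen p).mpr (h p hg)
    simp only [this, if_true]

theorem pv_walkA_exact (d : PySem.Dict String String) :
    ∀ (L : List String) (c : String) (seen : List String) (n : Nat),
      L.Nodup → (∀ x ∈ L, x ∉ seen) → pvIsPath d c L →
      (∀ p, d.get? (L.getLastD c) = some p → p ∈ seen ∨ p ∈ L) →
      L.length < n → pvWalkA d n seen c = seen ++ L := by
  intro L
  induction L with
  | nil =>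
    intro c seen n _ _ _ hstop hn
    obtain ⟨m, rfl⟩ : ∃ m, n = m + 1 := ⟨n - 1, by omega⟩
    simp only [List.getLastD_nil] at hstop
    rw [pv_walkA_stop d m seen c (fun p hp => by
      rcases hstop p hp with h | h
      · exact h
      · simp at h)]
    simp
  | cons x xs ih =>
    intro c seen n hnd hdisj hpath hstop hn
    obtain ⟨m, rfl⟩ : ∃ m, n = m + 1 := ⟨n - 1, by omega⟩
    obtain ⟨hgx, hpx⟩ := hpath
    have hxseen : x ∉ seen := hdisj x (by simp)
    rw [pv_walkA_step d m seen c x hgx hxseen,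
      ih x (seen ++ [x]) m (hnd.of_cons)
      (by intro y hy
          simp only [List.mem_append, List.mem_singleton]
          rintro (h | rfl)
          · exact hdisj y (by simp [hy]) h
          · exact (List.nodup_cons.mp hnd).1 hy)
      hpx
      (by intro p hp
          have heq : List.getLastD (x :: xs) c = List.getLastD xs x := List.getLastD_cons ..
          rw [heq] at hstop
          rcases hstop p hp with h | h
          · exact Or.inl (by simp [h])
          · rcases List.mem_cons.mp h with rfl | h
            · exact Or.inl (by simp)
            · exact Or.inr h)
      (by simpa using Nat.lt_of_succ_lt_succ hn)]
    simp

def pvARes (d : PySem.Dict String String) (c : String) (L : List String) : Prop :=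
  pvIsPath d c L ∧ L.Nodup ∧ (∀ p, d.get? (L.getLastD c) = some p → p ∈ L)

def pvChain (d : PySem.Dict String String) (c : String) : List String :=
  pvWalkA d (d.size + 1) PySem.Set.empty c

theorem pv_cardRem_lt (d : PySem.Dict String String) (seen : List String) (p : String)
    (hp : p ∈ d.values) (hps : p ∉ seen) :
    (d.values.filter (fun v => !(seen ++ [p]).contains v)).length <
      (d.values.filter (fun v => !seen.contains v)).length := by
  have hsub : List.Sublist (d.values.filter (fun v => !(seen ++ [p]).contains v))
      (d.values.filter (fun v => !seen.contains v)) := by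
    apply List.monotone_filter_right
    intro v hv
    simp only [Bool.not_eq_eq_eq_not, Bool.not_true, List.contains_eq_mem,
      decide_eq_false_iff_not, List.mem_append, List.mem_singleton] at hv ⊢
    exact fun h => hv (Or.inl h)
  have hne : (d.values.filter (fun v => !(seen ++ [p]).contains v)) ≠
      (d.values.filter (fun v => !seen.contains v)) := by
    intro heq
    have h1 : p ∈ d.values.filter (fun v => !seen.contains v) := by
      simp only [List.mem_filter, Bool.not_eq_eq_eq_not, Bool.not_true, List.contains_eq_mem,
        decide_eq_false_iff_not]
      exact ⟨hp, hps⟩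
    rw [← heq] at h1
    simp [List.mem_filter] at h1
  exact Nat.lt_of_le_of_ne hsub.length_le (fun h => hne (hsub.eq_of_length h))

theorem pv_walkA_exists_gen (d : PySem.Dict String String) :
    ∀ (n : Nat) (seen : List String) (c : String),
      (d.values.filter (fun v => !seen.contains v)).length < n →
      ∃ L, pvWalkA d n seen c = seen ++ L ∧ pvIsPath d c L ∧ L.Nodup ∧
        (∀ x ∈ L, x ∉ seen) ∧
        (∀ p, d.get? (L.getLastD c) = some p → p ∈ seen ∨ p ∈ L) ∧
        (∀ x ∈ L, x ∈ d.values) := by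
  intro n
  induction n with
  | zero => intro seen c h; omega
  | succ m ih =>
    intro seen c hn
    cases hg : d.get? c with
    | none =>
      refine ⟨[], ?_, trivial, List.nodup_nil, by simp, ?_, by simp⟩
      · rw [pv_walkA_stop d m seen c (fun p hp => by rw [hg] at hp; cases hp)]; simp
      · intro p hp; rw [List.getLastD_nil, hg] at hp; cases hp
    | some p =>
      by_cases hps : p ∈ seen
      · refine ⟨[], ?_, trivial, List.nodup_nil, by simp, ?_, by simp⟩
        · rw [pv_walkA_stop d m seen c (fun q hq => by
            rw [hg] at hq; injection hq with h; exact h ▸ hps)]; simp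
        · intro q hq
          rw [List.getLastD_nil, hg] at hq
          injection hq with h; exact Or.inl (h ▸ hps)
      · have hpv : p ∈ d.values := pv_get_mem_values d c p hg
        have hlt := pv_cardRem_lt d seen p hpv hps
        obtain ⟨L', hw, hpath, hnd, hdisj, hstop, hval⟩ :=
          ih (seen ++ [p]) p (by omega)
        refine ⟨p :: L', ?_, ⟨hg, hpath⟩, ?_, ?_, ?_, ?_⟩
        · rw [pv_walkA_step d m seen c p hg hps, hw]; simp
        · exact List.nodup_cons.mpr ⟨fun h => hdisj p h (by simp), hnd⟩
        · intro x hx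
          rcases List.mem_cons.mp hx with rfl | hx
          · exact hps
          · exact fun h => hdisj x hx (by simp [h])
        · intro q hq
          rw [show (p :: L').getLastD c = L'.getLastD p from List.getLastD_cons ..] at hq
          rcases hstop q hq with h | h
          · rcases List.mem_append.mp h with h | h
            · exact Or.inl h
            · exact Or.inr (by simp at h; simp [h])
          · exact Or.inr (List.mem_cons_of_mem _ h)
        · intro x hx
          rcases List.mem_cons.mp hx with rfl | hx
          · exact hpv
          · exact hval x hx

theorem pv_walkA_exists (d : PySem.Dict String String) (c : String) :
    ∃ L, pvARes d c L ∧ (∀ x ∈ L, x ∈ d.values) ∧ pvChain d c = L := by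
  have hlen : (d.values.filter (fun v => !([] : List String).contains v)).length < d.size + 1 := by
    have h1 : (d.values.filter (fun v => !([] : List String).contains v)).length ≤ d.values.length :=
      (List.filter_sublist (l := d.values) (p := fun v => !([] : List String).contains v)).length_le
    have h2 : d.values.length = d.size := by simp [PySem.Dict.values, PySem.Dict.size]
    omega
  obtain ⟨L, hw, hpath, hnd, _, hstop, hval⟩ := pv_walkA_exists_gen d (d.size + 1) [] c hlen
  refine ⟨L, ⟨hpath, hnd, fun p hp => ?_⟩, hval, ?_⟩
  · rcases hstop p hp with h | h
    · cases h
    · exact h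
  · rw [pvChain, show (PySem.Set.empty : PySem.Set String) = ([] : List String) from rfl, hw]
    simp

theorem pv_chain_none (d : PySem.Dict String String) (c : String)
    (h : d.get? c = none) : pvChain d c = [] := by
  rw [pvChain, pv_walkA_stop d d.size PySem.Set.empty c
    (fun p hp => by rw [h] at hp; cases hp)]
  rfl

theorem pv_mem_last (d : PySem.Dict String String) (p : String) (L : List String)
    (hpath : pvIsPath d p L) (hnd : L.Nodup) (hmem : p ∈ L) :
    ∃ A, L = A ++ [p] ∧ p ∉ A := by
  obtain ⟨A, B, rfl⟩ := List.append_of_mem hmem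
  obtain ⟨hndA, hndB, hdisj⟩ := List.nodup_append.mp hnd
  have hnA : p ∉ A := fun h => hdisj p h p (by simp) rfl
  cases B with
  | nil => exact ⟨A, rfl, hnA⟩
  | cons b B' =>
    exfalso
    rw [show A ++ p :: b :: B' = A ++ [p] ++ (b :: B') by simp] at hpath
    rw [pv_isPath_append] at hpath
    obtain ⟨hp1, hp2⟩ := hpath
    rw [pv_isPath_append] at hp1
    obtain ⟨hpA, hplast⟩ := hp1
    have hgl : d.get? (A.getLastD p) = some p := hplast.1
    have hgpb : d.get? p = some b := by
      have : (A ++ [p]).getLastD p = p := by simp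
      rw [this] at hp2
      exact hp2.1
    cases A with
    | nil =>
      simp only [List.getLastD_nil] at hgl
      have hbp : b = p := by rw [hgl] at hgpb; injection hgpb with h; exact h.symm
      subst hbp
      simp at hndB
    | cons a A' =>
      have hga : d.get? p = some a := hpA.1
      have hab : b = a := by rw [hga] at hgpb; injection hgpb with h; exact h.symm
      subst hab
      exact hdisj b (by simp) b (by simp) rfl

theorem pv_chain_rec (d : PySem.Dict String String) (c p : String)
    (h : d.get? c = some p) :
    pvChain d c = p :: (pvChain d p).filter (fun y => !(y == p)) := by
  obtain ⟨Lp, ⟨hpath, hnd, hstop⟩, hval, hLp⟩ := pv_walkA_exists d p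
  have hpv : p ∈ d.values := pv_get_mem_values d c p h
  rw [hLp]
  by_cases hmem : p ∈ Lp
  · obtain ⟨A, rfl, hnA⟩ := pv_mem_last d p Lp hpath hnd hmem
    have hfilter : (A ++ [p]).filter (fun y => !(y == p)) = A := by
      rw [List.filter_append]
      have h1 : A.filter (fun y => !(y == p)) = A :=
        List.filter_eq_self.mpr (fun x hx => by
          simp only [Bool.not_eq_true', beq_eq_false_iff_ne, ne_eq]
          exact fun hh => hnA (hh ▸ hx))
      simp [h1]
    rw [hfilter]
    obtain ⟨hndA, _, hdisjA⟩ := List.nodup_append.mp hnd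
    rw [pv_isPath_append] at hpath
    obtain ⟨hpA, hpl⟩ := hpath
    -- chain of c is p :: A
    have hlen : (p :: A).length < d.size + 1 := by
      have := pv_len_le d (A ++ [p]) hnd hval
      simp at this ⊢
      omega
    have := pv_walkA_exact d (p :: A) c [] (d.size + 1)
      (by
        refine List.nodup_cons.mpr ⟨hnA, hndA⟩)
      (by simp)
      (⟨h, hpA⟩)
      (by
        intro q hq
        rw [show (p :: A).getLastD c = A.getLastD p from List.getLastD_cons ..] at hq
        have : d.get? (A.getLastD p) = some p := hpl.1
        rw [this] at hq
        injection hq with hh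
        exact Or.inr (by simp [hh]))
      hlen
    rw [pvChain, show (PySem.Set.empty : PySem.Set String) = ([] : List String) from rfl, this]
    simp
  · have hfilter : Lp.filter (fun y => !(y == p)) = Lp :=
      List.filter_eq_self.mpr (fun x hx => by
        simp only [Bool.not_eq_true', beq_eq_false_iff_ne, ne_eq]
        exact fun hh => hmem (hh ▸ hx))
    rw [hfilter]
    have hlen : (p :: Lp).length < d.size + 1 := by
      have := pv_len_le d (p :: Lp) (List.nodup_cons.mpr ⟨hmem, hnd⟩)
        (fun x hx => by
          rcases List.mem_cons.mp hx with rfl | hx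
          · exact hpv
          · exact hval x hx)
      omega
    have := pv_walkA_exact d (p :: Lp) c [] (d.size + 1)
      (List.nodup_cons.mpr ⟨hmem, hnd⟩)
      (by simp)
      (⟨h, hpath⟩)
      (by
        intro q hq
        rw [show (p :: Lp).getLastD c = Lp.getLastD p from List.getLastD_cons ..] at hq
        exact Or.inr (List.mem_cons_of_mem _ (hstop q hq)))
      hlen
    rw [pvChain, show (PySem.Set.empty : PySem.Set String) = ([] : List String) from rfl, this]
    simp

def pvLinks (d : PySem.Dict String String) : List String → String → Prop
  | [], _ => True
  | x :: xs, cur => pvIsPath d x (xs ++ [cur])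

theorem pv_links_snoc (d : PySem.Dict String String) (path : List String) (cur p : String)
    (hl : pvLinks d path cur) (hg : d.get? cur = some p) :
    pvLinks d (path ++ [cur]) p := by
  cases path with
  | nil => exact ⟨hg, trivial⟩
  | cons x xs =>
    show pvIsPath d x ((xs ++ [cur]) ++ [p])
    rw [pv_isPath_append]
    refine ⟨hl, ?_⟩
    have : (xs ++ [cur]).getLastD x = cur := by simp
    rw [this]
    exact ⟨hg, trivial⟩


theorem pv_keysRem_lt (M seen : List String) (p : String)
    (hp : p ∈ M) (hps : p ∉ seen) :
    (M.filter (fun v => !(seen ++ [p]).contains v)).length <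
      (M.filter (fun v => !seen.contains v)).length := by
  have hsub : List.Sublist (M.filter (fun v => !(seen ++ [p]).contains v))
      (M.filter (fun v => !seen.contains v)) := by
    apply List.monotone_filter_right
    intro v hv
    simp only [Bool.not_eq_eq_eq_not, Bool.not_true, List.contains_eq_mem,
      decide_eq_false_iff_not, List.mem_append, List.mem_singleton] at hv ⊢
    exact fun h => hv (Or.inl h)
  have hne : (M.filter (fun v => !(seen ++ [p]).contains v)) ≠
      (M.filter (fun v => !seen.contains v)) := by
    intro heq
    have h1 : p ∈ M.filter (fun v => !seen.contains v) := by
      simp only [List.mem_filter, Bool.not_eq_eq_eq_not, Bool.not_true, List.contains_eq_mem,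
        decide_eq_false_iff_not]
      exact ⟨hp, hps⟩
    rw [← heq] at h1
    simp [List.mem_filter] at h1
  exact Nat.lt_of_le_of_ne hsub.length_le (fun h => hne (hsub.eq_of_length h))

theorem pv_contains_mem_keys (d : PySem.Dict String String) (x : String) :
    d.contains x = true ↔ x ∈ d.keys := by
  simp [PySem.Dict.contains, PySem.Dict.keys, List.any_eq_true, List.mem_map]

theorem pv_walkB_spec (d : PySem.Dict String String) (memo : PySem.Dict String (PySem.Set String)) :
    ∀ (n : Nat) (path : List String) (cur : String),
      path.Nodup →
      (∀ x ∈ path, d.contains x = true ∧ memo.contains x = false) →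
      pvLinks d path cur →
      (d.keys.filter (fun x => !path.contains x)).length < n →
      ∃ path' cur', pvWalkB d memo n path path cur = (path', path', cur') ∧
        ((path' = path ∧ cur' = cur) ∨ ∃ rest, path' = path ++ cur :: rest) ∧
        path'.Nodup ∧
        (∀ x ∈ path', d.contains x = true ∧ memo.contains x = false) ∧
        pvLinks d path' cur' ∧
        ¬(d.contains cur' = true ∧ memo.contains cur' = false ∧ cur' ∉ path') := by
  intro n
  induction n with
  | zero => intro path cur _ _ _ h; omega
  | succ m ih =>
    intro path cur hnd hprops hlinks hlen
    by_cases hguard : d.contains cur = true ∧ memo.contains cur = false ∧ cur ∉ path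
    · obtain ⟨hc, hm, hnp⟩ := hguard
      have hcont : PySem.Set.contains path cur = false := by
        rw [← Bool.not_eq_true, pv_contains_iff]; exact hnp
      obtain ⟨p, hgp⟩ : ∃ p, d.get? cur = some p := by
        cases hg : d.get? cur with
        | none =>
          exfalso
          rw [PySem.Dict.contains] at hc
          simp only [List.any_eq_true] at hc
          obtain ⟨pr, hpr, he⟩ := hc
          have : d.get? cur ≠ none := by
            rw [PySem.Dict.get?]
            simp only [ne_eq, Option.map_eq_none_iff, List.find?_eq_none, not_forall]
            exact ⟨pr, hpr, by simpa using he⟩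
          exact this hg
        | some p => exact ⟨p, rfl⟩
      have hstep : pvWalkB d memo (m+1) path path cur =
          pvWalkB d memo m (path ++ [cur]) (path ++ [cur]) p := by
        show (if d.contains cur && !(memo.contains cur) && !(PySem.Set.contains path cur) then
          pvWalkB d memo m (path ++ [cur]) (PySem.Set.add path cur) (d.getD cur "")
          else (path, path, cur)) = _
        rw [hc, hm, hcont]
        simp only [Bool.not_false, Bool.and_self, if_true]
        rw [pv_set_add_eq path cur hnp, PySem.Dict.getD, hgp]
        rfl
      have hnd' : (path ++ [cur]).Nodup := by
        rw [List.nodup_append]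
        exact ⟨hnd, List.nodup_singleton _, by
          intro a ha b hb
          simp only [List.mem_singleton] at hb
          subst hb
          exact fun h => hnp (h ▸ ha)⟩
      obtain ⟨path', cur', hrun, hext, hnd'', hprops', hlinks', hstop'⟩ :=
        ih (path ++ [cur]) p hnd'
          (by intro x hx
              rcases List.mem_append.mp hx with h | h
              · exact hprops x h
              · simp only [List.mem_singleton] at h; subst h; exact ⟨hc, hm⟩)
          (pv_links_snoc d path cur p hlinks hgp)
          (by
            have := pv_keysRem_lt d.keys path cur ((pv_contains_mem_keys d cur).mp hc) hnp
            omega)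
      refine ⟨path', cur', hstep ▸ hrun, ?_, hnd'', hprops', hlinks', hstop'⟩
      rcases hext with ⟨rfl, rfl⟩ | ⟨rest, rfl⟩
      · exact Or.inr ⟨[], by simp⟩
      · exact Or.inr ⟨p :: rest, by simp⟩
    · -- guard false: loop exits immediately
      refine ⟨path, cur, ?_, Or.inl ⟨rfl, rfl⟩, hnd, hprops, hlinks, hguard⟩
      show (if d.contains cur && !(memo.contains cur) && !(PySem.Set.contains path cur) then
        pvWalkB d memo m (path ++ [cur]) (PySem.Set.add path cur) (d.getD cur "")
        else (path, path, cur)) = (path, path, cur)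
      have : (d.contains cur && !(memo.contains cur) && !(PySem.Set.contains path cur)) = false := by
        rcases Decidable.not_and_iff_not_or_not.mp hguard with h | h
        · simp [Bool.eq_false_iff.mpr h]
        · rcases Decidable.not_and_iff_not_or_not.mp h with h2 | h2
          · have : memo.contains cur = true := by
              cases hmc : memo.contains cur
              · exact absurd hmc h2
              · rfl
            simp [this]
          · have : PySem.Set.contains path cur = true := by
              rw [pv_contains_iff]
              by_contra hh
              exact h2 hh
            simp only [this, Bool.not_true, Bool.and_false]
      rw [this]
      simp

-- ancestor chains of cycle nodes: each node on the cycle sees the whole cycle,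
-- rotated so that the node itself comes last
theorem pv_rot_chain (d : PySem.Dict String String) (cur : String) (post : List String)
    (hrot : pvIsPath d cur (post ++ [cur])) (hnd : (cur :: post).Nodup)
    (hkeys : ∀ x ∈ cur :: post, x ∈ d.keys) :
    ∀ k, (hk : k < (cur :: post).length) →
      pvChain d ((cur :: post)[k]) =
        (cur :: post).drop (k+1) ++ (cur :: post).take (k+1) := by
  intro k hk
  have hkeylen : (cur :: post).length ≤ d.size := by
    have h1 : List.Subperm (cur :: post) d.keys := hnd.subperm hkeys
    have h2 := h1.length_le
    have h3 : d.keys.length = d.size := by simp [PySem.Dict.keys, PySem.Dict.size]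
    omega
  cases k with
  | zero =>
    simp only [List.getElem_cons_zero, List.drop_succ_cons, List.drop_zero,
      List.take_succ_cons, List.take_zero]
    have := pv_walkA_exact d (post ++ [cur]) cur [] (d.size + 1)
      (by
        rw [List.nodup_append]
        obtain ⟨h1, h2⟩ := List.nodup_cons.mp hnd
        exact ⟨h2, List.nodup_singleton _, by
          intro a ha b hb
          simp only [List.mem_singleton] at hb
          subst hb
          exact fun h => h1 (h ▸ ha)⟩)
      (by simp)
      hrot
      (by
        intro q hq
        simp only [List.getLastD_concat] at hq
        have hcurlink : d.get? cur = some ((post ++ [cur]).headD cur) := by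
          cases post with
          | nil => exact hrot.1
          | cons y ys => exact hrot.1
        rw [hcurlink] at hq
        injection hq with hh
        refine Or.inr ?_
        rw [← hh]
        cases post with
        | nil => simp
        | cons y ys => simp
      )
      (by simp at hkeylen ⊢; omega)
    rw [pvChain, show (PySem.Set.empty : PySem.Set String) = ([] : List String) from rfl, this]
    simp
  | succ j =>
    have hj : j < post.length := by simpa using hk
    set x := post[j] with hx
    set C1 := post.take j with hC1
    set C2 := post.drop (j+1) with hC2
    have hsplit : post = C1 ++ x :: C2 := by
      conv_lhs => rw [← List.take_append_drop j post]
      rw [List.drop_eq_getElem_cons hj]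
    set R := C2 ++ cur :: C1 ++ [x] with hR
    have hperm : (cur :: post).Perm R := by
      have h1 : cur :: post = (cur :: C1 ++ [x]) ++ C2 := by
        rw [hsplit]; simp
      have h2 : R = C2 ++ (cur :: C1 ++ [x]) := by rw [hR]; simp
      rw [h1, h2]
      exact List.perm_append_comm
    have hndR : R.Nodup := hperm.nodup_iff.mp hnd
    have hlenR : R.length < d.size + 1 := by
      have := hperm.length_eq
      omega
    have hrot' : pvIsPath d cur ((C1 ++ [x]) ++ (C2 ++ [cur])) := by
      have : post ++ [cur] = (C1 ++ [x]) ++ (C2 ++ [cur]) := by rw [hsplit]; simp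
      rw [← this]
      exact hrot
    rw [pv_isPath_append] at hrot'
    obtain ⟨h1, h2⟩ := hrot'
    have hgl : (C1 ++ [x]).getLastD cur = x := by simp
    rw [hgl] at h2
    have hpathR : pvIsPath d x R := by
      have : R = (C2 ++ [cur]) ++ (C1 ++ [x]) := by rw [hR]; simp
      rw [this, pv_isPath_append]
      refine ⟨h2, ?_⟩
      have : (C2 ++ [cur]).getLastD x = cur := by simp
      rw [this]
      exact h1
    have hstopR : ∀ q, d.get? (R.getLastD x) = some q → q ∈ R := by
      intro q hq
      have hrx : R = (C2 ++ cur :: C1) ++ [x] := by simp [hR]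
      have : R.getLastD x = x := by rw [hrx, List.getLastD_concat]
      rw [this] at hq
      have hhead : d.get? x = some ((C2 ++ [cur]).headD x) := by
        cases hc2 : C2 with
        | nil => rw [hc2] at h2; exact h2.1
        | cons c t => rw [hc2] at h2; exact h2.1
      rw [hhead] at hq
      injection hq with hh
      rw [← hh]
      cases hc2 : C2 with
      | nil => simp [hR, hc2]
      | cons c t => simp [hR, hc2]
    have hwalk := pv_walkA_exact d R x [] (d.size + 1) hndR (by simp) hpathR
      (fun q hq => Or.inr (hstopR q hq)) hlenR
    have hchain : pvChain d x = R := by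
      rw [pvChain, show (PySem.Set.empty : PySem.Set String) = ([] : List String) from rfl, hwalk]
      simp
    have hgoal1 : (cur :: post)[j+1]'hk = x := by simp [hx]
    have hgoal2 : (cur :: post).drop (j+1+1) = C2 := by simp [hC2]
    have hgoal3 : (cur :: post).take (j+1+1) = cur :: (C1 ++ [x]) := by
      simp only [List.take_succ_cons]
      rw [List.take_succ_eq_append_getElem hj, hC1, hx]
    rw [hgoal1, hgoal2, hgoal3, hchain, hR]
    simp

theorem pv_index_eq (pre post : List String) (c : String) (h : c ∉ pre) :
    PySem.List.index? (pre ++ c :: post) c = some pre.length := by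
  simp only [PySem.List.index?]
  induction pre with
  | nil => simp [List.idxOf?_cons]
  | cons a t ih =>
    rw [List.cons_append, List.idxOf?_cons]
    have hac : (a == c) = false := by
      simp only [beq_eq_false_iff_ne, ne_eq]
      rintro rfl
      exact h (by simp)
    rw [hac]
    simp only [Bool.false_eq_true, if_false, ih (fun hm => h (List.mem_cons_of_mem _ hm))]
    simp

theorem pv_chain_nodup (d : PySem.Dict String String) (c : String) : (pvChain d c).Nodup := by
  obtain ⟨L, ⟨_, hnd, _⟩, _, hL⟩ := pv_walkA_exists d c
  rw [hL]; exact hnd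

-- the memo invariant of B's outer loop: every stored entry is A's chain for its key
def pvInv (d : PySem.Dict String String) (m : PySem.Dict String (PySem.Set String)) : Prop :=
  m.keys.Nodup ∧ (∀ y ∈ m.keys, y ∈ d.keys) ∧ (∀ y l, m.get? y = some l → l = pvChain d y)

theorem pv_inv_insert (d : PySem.Dict String String) (m : PySem.Dict String (PySem.Set String))
    (x : String) (L : PySem.Set String) (hInv : pvInv d m) (hx : x ∈ d.keys)
    (hL : L = pvChain d x) : pvInv d (m.insert x L) := by
  obtain ⟨hnd, hsub, hval⟩ := hInv
  refine ⟨PySem.Dict.nodup_keys_insert m x L hnd, ?_, ?_⟩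
  · intro y hy
    rcases (PySem.Dict.mem_keys_insert m x y L).mp hy with rfl | hy
    · exact hx
    · exact hsub y hy
  · intro y l hl
    rw [PySem.Dict.get?_insert] at hl
    by_cases hyx : y = x
    · rw [if_pos hyx] at hl
      injection hl with hh
      rw [← hh, hL, hyx]
    · rw [if_neg hyx] at hl
      exact hval y l hl

theorem pv_contains_insert_mono (m : PySem.Dict String (PySem.Set String))
    (x y : String) (L : PySem.Set String) (h : m.contains y = true) :
    (m.insert x L).contains y = true := by
  rw [PySem.Dict.contains_insert]
  simp [h]

theorem pv_contains_some (m : PySem.Dict String (PySem.Set String)) (k : String)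
    (h : m.contains k = true) : ∃ l, m.get? k = some l := by
  rw [PySem.Dict.contains_eq_isSome_get?] at h
  exact ⟨(m.get? k).get h, Option.eq_some_of_isSome h⟩

theorem pv_not_contains_get? (d : PySem.Dict String String)
    (m : PySem.Dict String (PySem.Set String)) (k : String)
    (hInv : pvInv d m) (h : k ∉ d.keys) : m.get? k = none := by
  rw [PySem.Dict.get?_eq_none_iff_not_mem_keys]
  intro hm
  exact h (hInv.2.1 k hm)

-- the port's rotation loop, rewritten from pyRange/slices to range/drop/take
theorem pv_rotloop_eq (cyc : List String) (hnd : cyc.Nodup)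
    (memo : PySem.Dict String (PySem.Set String)) :
    (PySem.List.pyRange 0 cyc.length 1).foldl (fun m i =>
        m.insert (PySem.List.pyGetD cyc i "")
          (PySem.Set.ofList (PySem.List.slice cyc (some (i + 1)) none ++
                             PySem.List.slice cyc none (some (i + 1))))) memo
    = (List.range cyc.length).foldl (fun m k =>
        m.insert (cyc.getD k "") (cyc.drop (k+1) ++ cyc.take (k+1))) memo := by
  rw [PySem.List.pyRange_one]
  simp only [Int.sub_zero, Int.toNat_natCast, List.foldl_map]
  apply PySem.List.foldl_congr_mem
  intro acc k hk
  have h0 : ((0:Int) + (k : Int)) = ((k : Nat) : Int) := by ring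
  rw [h0]
  rw [show ((k : Int) + 1) = (((k+1 : Nat)) : Int) by push_cast; ring]
  rw [PySem.List.pyGetD_natCast, PySem.List.slice_from_natCast,
    PySem.List.slice_to_natCast]
  congr 1
  apply PySem.Set.ofList_eq_self_of_nodup
  have hperm : List.Perm (cyc.drop (k+1) ++ cyc.take (k+1)) cyc := by
    have := List.perm_append_comm (l₁ := cyc.drop (k+1)) (l₂ := cyc.take (k+1))
    rw [List.take_append_drop] at this
    exact this
  exact hperm.nodup_iff.mpr hnd

theorem pv_rotloop_spec (d : PySem.Dict String String) (cyc : List String)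
    (memo : PySem.Dict String (PySem.Set String))
    (hInv : pvInv d memo) (hsub : ∀ x ∈ cyc, x ∈ d.keys)
    (hchain : ∀ k, (hk : k < cyc.length) →
      pvChain d (cyc[k]) = cyc.drop (k+1) ++ cyc.take (k+1)) :
    ∀ n, n ≤ cyc.length →
      pvInv d ((List.range n).foldl (fun m k =>
          m.insert (cyc.getD k "") (cyc.drop (k+1) ++ cyc.take (k+1))) memo) ∧
      (∀ y, memo.contains y = true →
        ((List.range n).foldl (fun m k =>
          m.insert (cyc.getD k "") (cyc.drop (k+1) ++ cyc.take (k+1))) memo).contains y = true) ∧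
      (∀ k, k < n →
        ((List.range n).foldl (fun m k =>
          m.insert (cyc.getD k "") (cyc.drop (k+1) ++ cyc.take (k+1))) memo).contains (cyc.getD k "") = true) ∧
      (∀ y, ((List.range n).foldl (fun m k =>
          m.insert (cyc.getD k "") (cyc.drop (k+1) ++ cyc.take (k+1))) memo).contains y = true →
        memo.contains y = true ∨ y ∈ cyc) := by
  intro n
  induction n with
  | zero => intro _; exact ⟨hInv, fun y h => h, fun k hk => absurd hk (by omega), fun y h => Or.inl h⟩
  | succ m ih =>
    intro hn
    obtain ⟨ih1, ih2, ih3, ih4⟩ := ih (by omega)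
    rw [List.range_succ, List.foldl_append, List.foldl_cons, List.foldl_nil]
    have hm : m < cyc.length := by omega
    have hgd : cyc.getD m "" = cyc[m] := List.getD_eq_getElem cyc "" hm
    refine ⟨?_, ?_, ?_, ?_⟩
    · apply pv_inv_insert d _ _ _ ih1
      · rw [hgd]; exact hsub _ (List.getElem_mem hm)
      · rw [hgd]; exact (hchain m hm).symm
    · intro y hy
      exact pv_contains_insert_mono _ _ _ _ (ih2 y hy)
    · intro k hk
      by_cases hkm : k = m
      · subst hkm
        rw [PySem.Dict.contains_insert]
        simp
      · exact pv_contains_insert_mono _ _ _ _ (ih3 k (by omega))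
    · intro y hy
      rw [PySem.Dict.contains_insert] at hy
      rcases Bool.or_eq_true_iff.mp hy with h | h
      · refine Or.inr ?_
        have : y = cyc.getD m "" := by simpa using h
        rw [this, hgd]
        exact List.getElem_mem hm
      · exact ih4 y h

-- B's back-to-front unwind loop: each node's chain is parent :: (parent's chain minus parent)
theorem pv_union_chain (d : PySem.Dict String String) (x p : String)
    (hg : d.get? x = some p) :
    PySem.Set.union (PySem.Set.ofList [p]) (pvChain d p) = pvChain d x := by
  rw [pv_chain_rec d x p hg]
  rw [show PySem.Set.ofList [p] = [p] from rfl, PySem.Set.union,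
    PySem.Set.update_eq_append_filter,
    PySem.Set.ofList_eq_self_of_nodup _ (pv_chain_nodup d p)]
  simp only [PySem.Set.contains, List.cons_append, List.nil_append]
  congr 1
  exact List.filter_congr (fun a _ => by rw [Bool.eq_iff_iff]; simp)

theorem pv_unwind_spec (d : PySem.Dict String String) :
    ∀ (path2 : List String) (memo2 : PySem.Dict String (PySem.Set String)) (cur : String),
      pvInv d memo2 → path2.Nodup →
      (∀ x ∈ path2, x ∈ d.keys ∧ memo2.contains x = false) →
      pvLinks d path2 cur → cur ∉ path2 →
      (d.get? cur = none ∨ memo2.get? cur = some (pvChain d cur)) →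
      pvInv d (path2.reverse.foldl (fun m node =>
          m.insert node (PySem.Set.union (PySem.Set.ofList [d.getD node ""])
            (m.getD (d.getD node "") PySem.Set.empty))) memo2) ∧
      (∀ y, memo2.contains y = true →
        (path2.reverse.foldl (fun m node =>
          m.insert node (PySem.Set.union (PySem.Set.ofList [d.getD node ""])
            (m.getD (d.getD node "") PySem.Set.empty))) memo2).contains y = true) ∧
      (∀ x ∈ path2,
        (path2.reverse.foldl (fun m node =>
          m.insert node (PySem.Set.union (PySem.Set.ofList [d.getD node ""])
            (m.getD (d.getD node "") PySem.Set.empty))) memo2).contains x = true) := by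
  intro path2
  induction path2 with
  | nil => intro memo2 cur hInv _ _ _ _ _; exact ⟨hInv, fun y h => h, by simp⟩
  | cons x xs ih =>
    intro memo2 cur hInv hnd hprops hlinks hcur hmemo
    rw [List.reverse_cons, List.foldl_append, List.foldl_cons, List.foldl_nil]
    -- first process xs (the reversed tail), then insert x
    have hxs := ih memo2 cur hInv hnd.of_cons
      (fun y hy => hprops y (List.mem_cons_of_mem _ hy))
      (by
        cases xs with
        | nil => trivial
        | cons y t => exact (hlinks : pvIsPath d x ((y :: t) ++ [cur])).2)
      (fun h => hcur (List.mem_cons_of_mem _ h)) hmemo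
    obtain ⟨hInv', hmono', hcont'⟩ := hxs
    set m' := (xs.reverse.foldl (fun m node =>
      m.insert node (PySem.Set.union (PySem.Set.ofList [d.getD node ""])
        (m.getD (d.getD node "") PySem.Set.empty))) memo2) with hm'
    -- the parent of x
    obtain ⟨p, hgp⟩ : ∃ p, d.get? x = some p := by
      have hx := (hprops x (by simp)).1
      rw [← PySem.Dict.contains_iff_mem_keys] at hx
      cases hg : d.get? x with
      | none =>
        rw [PySem.Dict.contains_eq_isSome_get?, hg] at hx
        simp at hx
      | some q => exact ⟨q, rfl⟩
    have hgd : d.getD x "" = p := by rw [PySem.Dict.getD, hgp]; rfl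
    have hphead : p = xs.headD cur := by
      cases xs with
      | nil =>
        have hthis : d.get? x = some cur := (hlinks : pvIsPath d x ([] ++ [cur])).1
        rw [hgp] at hthis
        simpa using Option.some.inj hthis
      | cons y t =>
        have hthis : d.get? x = some y := (hlinks : pvIsPath d x ((y :: t) ++ [cur])).1
        rw [hgp] at hthis
        simpa using Option.some.inj hthis
    have hgetp : m'.getD p PySem.Set.empty = pvChain d p := by
      cases hxs0 : xs with
      | nil =>
        subst hxs0
        simp only [List.headD_nil] at hphead
        subst hphead
        rw [hm']
        simp only [List.reverse_nil, List.foldl_nil]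
        rcases hmemo with h | h
        · have : memo2.get? p = none :=
            pv_not_contains_get? d memo2 p hInv
              (by rw [← PySem.Dict.get?_eq_none_iff_not_mem_keys]; exact h)
          simp [PySem.Dict.getD, this, pv_chain_none d p h, PySem.Set.empty]
        · simp [PySem.Dict.getD, h]
      | cons y t =>
        have hpy : p = y := by rw [hphead, hxs0]; rfl
        have hy : m'.contains y = true := by
          apply hcont' y
          rw [hxs0]; simp
        obtain ⟨l, hl⟩ := pv_contains_some m' y hy
        have := hInv'.2.2 y l hl
        rw [hpy, PySem.Dict.getD, hl, this]
        rfl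
    have hvalue : PySem.Set.union (PySem.Set.ofList [d.getD x ""])
        (m'.getD (d.getD x "") PySem.Set.empty) = pvChain d x := by
      rw [hgd, hgetp]
      exact pv_union_chain d x p hgp
    rw [hvalue]
    refine ⟨?_, ?_, ?_⟩
    · exact pv_inv_insert d m' x (pvChain d x) hInv' (hprops x (by simp)).1 rfl
    · intro y hy
      exact pv_contains_insert_mono _ _ _ _ (hmono' y hy)
    · intro y hy
      rcases List.mem_cons.mp hy with rfl | hy
      · rw [PySem.Dict.contains_insert]; simp
      · exact pv_contains_insert_mono _ _ _ _ (hcont' y hy)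


theorem pv_links_tail (d : PySem.Dict String String) (a : String) (rest : List String)
    (c : String) (h : pvLinks d (a :: rest) c) : pvLinks d rest c := by
  cases rest with
  | nil => trivial
  | cons y t => exact (h : pvIsPath d a ((y :: t) ++ [c])).2

theorem pv_links_suffix (d : PySem.Dict String String) :
    ∀ (pre suf : List String) (c : String), pvLinks d (pre ++ suf) c → pvLinks d suf c := by
  intro pre
  induction pre with
  | nil => intro suf c h; exact h
  | cons a t ih => intro suf c h; exact ih suf c (pv_links_tail d a (t ++ suf) c h)

theorem pv_links_prefix (d : PySem.Dict String String) (P : List String) (x : String)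
    (Q : List String) (c : String) (h : pvLinks d (P ++ x :: Q) c) : pvLinks d P x := by
  cases P with
  | nil => trivial
  | cons hh t =>
    have h' : pvIsPath d hh ((t ++ x :: Q) ++ [c]) := h
    have heq : (t ++ x :: Q) ++ [c] = (t ++ [x]) ++ (Q ++ [c]) := by simp
    rw [heq, pv_isPath_append] at h'
    exact h'.1

theorem pv_process_spec (d : PySem.Dict String String)
    (memo : PySem.Dict String (PySem.Set String)) (child : String)
    (hInv : pvInv d memo) (hchild : child ∈ d.keys) :
    pvInv d (pvProcess d memo child) ∧
    (∀ y, memo.contains y = true → (pvProcess d memo child).contains y = true) ∧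
    (pvProcess d memo child).contains child = true := by
  by_cases hmc : memo.contains child = true
  · rw [pvProcess, if_pos hmc]
    exact ⟨hInv, fun y h => h, hmc⟩
  · have hmc' : memo.contains child = false := by
      cases h : memo.contains child
      · rfl
      · exact absurd h hmc
    have hkeyslen : (d.keys.filter (fun x => !([] : List String).contains x)).length < d.size + 1 := by
      have : (d.keys.filter (fun x => !([] : List String).contains x)).length ≤ d.keys.length :=
        (List.filter_sublist (l := d.keys) (p := fun x => !([] : List String).contains x)).length_le
      have h2 : d.keys.length = d.size := by simp [PySem.Dict.keys, PySem.Dict.size]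
      omega
    obtain ⟨path', cur', hrun, hext, hnd', hprops', hlinks', hstop'⟩ :=
      pv_walkB_spec d memo (d.size + 1) [] child List.nodup_nil (by simp) trivial hkeyslen
    have hpath' : ∃ rest0, path' = child :: rest0 := by
      rcases hext with ⟨hp0, hc0⟩ | ⟨rest, hr⟩
      · exfalso
        apply hstop'
        refine ⟨?_, ?_, ?_⟩
        · rw [hc0]; exact (pv_contains_mem_keys d child).mpr hchild
        · rw [hc0]; exact hmc'
        · rw [hp0]; simp
      · exact ⟨rest, by simpa using hr⟩
    rw [pvProcess, if_neg hmc]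
    rw [show (PySem.Set.empty : PySem.Set String) = ([] : List String) from rfl, hrun]
    simp only
    by_cases hcyc : cur' ∈ path'
    · -- cycle branch
      have hcont : PySem.Set.contains path' cur' = true := (pv_contains_iff _ _).mpr hcyc
      rw [hcont]
      simp only [if_true]
      obtain ⟨pre, post, hdecomp⟩ := List.append_of_mem hcyc
      have hnpre : cur' ∉ pre := by
        rw [hdecomp] at hnd'
        obtain ⟨_, _, hdisj⟩ := List.nodup_append.mp hnd'
        exact fun h => hdisj cur' h cur' (by simp) rfl
      have hidx : (PySem.List.index? path' cur').getD 0 = pre.length := by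
        rw [hdecomp, pv_index_eq pre post cur' hnpre]
        rfl
      rw [hidx]
      have hdrop : PySem.List.slice path' (some (pre.length : Int)) none = cur' :: post := by
        rw [PySem.List.slice_from_natCast, hdecomp, List.drop_left]
      have htake : PySem.List.slice path' none (some (pre.length : Int)) = pre := by
        rw [PySem.List.slice_to_natCast, hdecomp, List.take_left]
      rw [hdrop, htake]
      set cyc := cur' :: post with hcycdef
      have hndcyc : cyc.Nodup := by
        rw [hdecomp] at hnd'
        exact hnd'.of_append_right
      have hcyckeys : ∀ x ∈ cyc, x ∈ d.keys := by
        intro x hx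
        exact (pv_contains_mem_keys d x).mp
          (hprops' x (by rw [hdecomp]; exact List.mem_append_right _ hx)).1
      have hrot : pvIsPath d cur' (post ++ [cur']) :=
        pv_links_suffix d pre cyc cur' (by rw [← hdecomp]; exact hlinks')
      have hchain := pv_rot_chain d cur' post hrot hndcyc hcyckeys
      rw [pv_rotloop_eq cyc hndcyc memo]
      obtain ⟨hInvR, hmonoR, hcontR, hfromR⟩ :=
        pv_rotloop_spec d cyc memo hInv hcyckeys hchain cyc.length (le_refl _)
      set memoR := (List.range cyc.length).foldl (fun m k =>
        m.insert (cyc.getD k "") (cyc.drop (k+1) ++ cyc.take (k+1))) memo with hmemoR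
      have hpredisj : ∀ x ∈ pre, x ∉ cyc := by
        intro x hx
        rw [hdecomp] at hnd'
        obtain ⟨_, _, hdisj⟩ := List.nodup_append.mp hnd'
        exact fun h => hdisj x hx x h rfl
      have hprefresh : ∀ x ∈ pre, x ∈ d.keys ∧ memoR.contains x = false := by
        intro x hx
        refine ⟨(pv_contains_mem_keys d x).mp
          (hprops' x (by rw [hdecomp]; exact List.mem_append_left _ hx)).1, ?_⟩
        cases hc : memoR.contains x
        · rfl
        · exfalso
          rcases hfromR x hc with h | h
          · have := (hprops' x (by rw [hdecomp]; exact List.mem_append_left _ hx)).2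
            rw [this] at h; cases h
          · exact hpredisj x hx h
      have hcurmemo : memoR.get? cur' = some (pvChain d cur') := by
        have hc0 : memoR.contains (cyc.getD 0 "") = true := hcontR 0 (by simp [hcycdef])
        have : cyc.getD 0 "" = cur' := rfl
        rw [this] at hc0
        obtain ⟨l, hl⟩ := pv_contains_some memoR cur' hc0
        rw [hl, hInvR.2.2 cur' l hl]
      have hprend : pre.Nodup := by
        rw [hdecomp] at hnd'
        exact hnd'.of_append_left
      have hprelinks : pvLinks d pre cur' :=
        pv_links_prefix d pre cur' post cur' (by rw [← hdecomp]; exact hlinks')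
      obtain ⟨hInvF, hmonoF, hcontF⟩ :=
        pv_unwind_spec d pre memoR cur' hInvR hprend hprefresh hprelinks hnpre
          (Or.inr hcurmemo)
      refine ⟨hInvF, ?_, ?_⟩
      · intro y hy
        exact hmonoF y (hmonoR y hy)
      · obtain ⟨rest0, hp⟩ := hpath'
        cases pre with
        | nil =>
          have hcc : child = cur' := by
            rw [hdecomp] at hp
            have := congrArg (fun l => l.headD "") hp
            simpa using this.symm
          simp only [List.reverse_nil, List.foldl_nil]
          rw [hcc]
          exact hcontR 0 (by simp [hcycdef])
        | cons ph pt =>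
          have hcc : child = ph := by
            rw [hdecomp] at hp
            have := congrArg (fun l => l.headD "") hp
            simpa using this.symm
          rw [hcc]
          exact hcontF ph (by simp)
    · -- no cycle: unwind the whole path
      have hcont : PySem.Set.contains path' cur' = false := by
        rw [← Bool.not_eq_true, pv_contains_iff]; exact hcyc
      rw [hcont]
      simp only [Bool.false_eq_true, if_false]
      have hfresh : ∀ x ∈ path', x ∈ d.keys ∧ memo.contains x = false := by
        intro x hx
        exact ⟨(pv_contains_mem_keys d x).mp (hprops' x hx).1, (hprops' x hx).2⟩
      have hcurcase : d.get? cur' = none ∨ memo.get? cur' = some (pvChain d cur') := by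
        rcases Decidable.not_and_iff_not_or_not.mp hstop' with h | h
        · left
          rw [PySem.Dict.get?_eq_none_iff_not_mem_keys]
          intro hm
          exact h ((pv_contains_mem_keys d cur').mpr hm)
        · rcases Decidable.not_and_iff_not_or_not.mp h with h2 | h2
          · right
            have : memo.contains cur' = true := by
              cases hc : memo.contains cur'
              · exact absurd hc h2
              · rfl
            obtain ⟨l, hl⟩ := pv_contains_some memo cur' this
            rw [hl, hInv.2.2 cur' l hl]
          · exact absurd (by by_contra hh; exact h2 hh : cur' ∈ path') hcyc
      obtain ⟨hInvF, hmonoF, hcontF⟩ :=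
        pv_unwind_spec d path' memo cur' hInv hnd' hfresh hlinks' hcyc hcurcase
      refine ⟨hInvF, hmonoF, ?_⟩
      obtain ⟨rest0, hp⟩ := hpath'
      exact hcontF child (by rw [hp]; simp)

theorem pv_inv_empty (d : PySem.Dict String String) : pvInv d PySem.Dict.empty := by
  refine ⟨?_, ?_, ?_⟩
  · simp [PySem.Dict.keys, PySem.Dict.empty]
  · intro y hy; simp [PySem.Dict.keys, PySem.Dict.empty] at hy
  · intro y l hl; simp [PySem.Dict.get?, PySem.Dict.empty] at hl

theorem pv_outer_spec (d : PySem.Dict String String) :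
    ∀ (ks : List String) (m : PySem.Dict String (PySem.Set String)),
      pvInv d m → (∀ x ∈ ks, x ∈ d.keys) →
      pvInv d (ks.foldl (pvProcess d) m) ∧
      (∀ y, m.contains y = true → (ks.foldl (pvProcess d) m).contains y = true) ∧
      (∀ x ∈ ks, (ks.foldl (pvProcess d) m).contains x = true) := by
  intro ks
  induction ks with
  | nil => intro m hInv _; exact ⟨hInv, fun y h => h, by simp⟩
  | cons k kt ih =>
    intro m hInv hks
    obtain ⟨hInv1, hmono1, hcont1⟩ := pv_process_spec d m k hInv (hks k (by simp))
    obtain ⟨hInv2, hmono2, hcont2⟩ := ih (pvProcess d m k) hInv1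
      (fun x hx => hks x (List.mem_cons_of_mem _ hx))
    rw [List.foldl_cons]
    refine ⟨hInv2, ?_, ?_⟩
    · intro y hy; exact hmono2 y (hmono1 y hy)
    · intro x hx
      rcases List.mem_cons.mp hx with rfl | hx
      · exact hmono2 x hcont1
      · exact hcont2 x hx

theorem pv_items_A (d : PySem.Dict String String) (hnd : d.keys.Nodup) :
    (d.keys.foldl (fun (anc : PySem.Dict String (PySem.Set String)) child =>
        anc.insert child (pvWalkA d (d.size + 1) PySem.Set.empty child)) PySem.Dict.empty).items
      = d.keys.map (fun c => (c, pvChain d c)) := by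
  have h := PySem.Dict.items_foldl_insert_fresh (l := d.keys) (k := fun a => a)
    (v := fun a => pvWalkA d (d.size + 1) PySem.Set.empty a) (d := PySem.Dict.empty)
    (by intro a _; simp [PySem.Dict.contains, PySem.Dict.empty])
    (by simpa using hnd)
  simpa [pvChain] using h

theorem pv_items_B (d : PySem.Dict String String) (hnd : d.keys.Nodup)
    (memoF : PySem.Dict String (PySem.Set String)) :
    (d.keys.foldl (fun (out : PySem.Dict String (PySem.Set String)) c =>
        out.insert c (memoF.getD c PySem.Set.empty)) PySem.Dict.empty).items
      = d.keys.map (fun c => (c, memoF.getD c PySem.Set.empty)) := by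
  have h := PySem.Dict.items_foldl_insert_fresh (l := d.keys) (k := fun a => a)
    (v := fun a => memoF.getD a PySem.Set.empty) (d := PySem.Dict.empty)
    (by intro a _; simp [PySem.Dict.contains, PySem.Dict.empty])
    (by simpa using hnd)
  simpa using h

theorem pv_main (exception_parents : List (String × String)) :
    build_ancestor_map_py exception_parents = build_ancestor_map_py_alt exception_parents := by
  rw [build_ancestor_map_py, build_ancestor_map_py_alt]
  set d := PySem.Dict.ofList exception_parents with hd
  have hnd : d.keys.Nodup := PySem.Dict.nodup_keys_ofList exception_parents
  obtain ⟨hInvF, _, hcontF⟩ :=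
    pv_outer_spec d d.keys PySem.Dict.empty (pv_inv_empty d) (fun x hx => hx)
  rw [pv_items_A d hnd, pv_items_B d hnd]
  apply List.map_congr_left
  intro c hc
  have hcc := hcontF c hc
  obtain ⟨l, hl⟩ := pv_contains_some _ c hcc
  rw [PySem.Dict.getD, hl, hInvF.2.2 c l hl]
  rfl


-- ===== VERDICT (by name: the statement is the Claim_ definition above) =====
theorem build_ancestor_map_py_spec : Claim_equal_build_ancestor_map_py := by
  intro exception_parents _
  unfold Spec_build_ancestor_map_py
  exact pv_main exception_parents
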